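-- pv_equiv track=rewrite | github.com/tr1ten/DNA | asas.py | solve
-- ===== SOURCE A (Python) =====
-- from collections import Counter
--
-- def solve(mat):
--     m,n = len(mat),len(mat[0])
--     ans = 0
--     pref =Counter()
--     cnt = Counter()
--     for i in range(m):
--         for j in range(n):
--             ans += i*cnt[mat[i][j]] - pref[mat[i][j]]
--         for j in range(n):
--             cnt[mat[i][j]] += 1
--             pref[mat[i][j]] += i
--
--     # same for y distance
--     pref = Counter()
--     cnt = Counter()
--     for j in range(n):
--         for i in range(m):
--             ans += j*cnt[mat[i][j]] - pref[mat[i][j]]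
--         for i in range(m):
--             cnt[mat[i][j]] += 1
--             pref[mat[i][j]] += j
--     return ans
-- ===== SOURCE B (Python) =====
-- def _sweep(xs):
--     # xs sorted nondecreasing: sum over pairs p<q of xs[q]-xs[p], via prefix sums
--     total = run = 0
--     for k, x in enumerate(xs):
--         total += x * k - run
--         run += x
--     return total
--
-- def solve(mat):
--     n = len(mat[0])
--     groups = {}
--     for i, row in enumerate(mat):
--         for j in range(n):
--             groups.setdefault(row[j], []).append((i, j))
--     ans = 0
--     for pts in groups.values():
--         ans += _sweep(sorted(p[0] for p in pts))
--         ans += _sweep(sorted(p[1] for p in pts))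
--     return ans
-- ===== Notes on version B (the rewrite author's own statement) =====
-- stated objective: alternative
-- what changed: Replaces A's two counter-sweep passes (row-major and column-major, with running per-value count and coordinate prefix-sum Counters) by one grouping pass that collects each value's cell coordinates, then per group computes the pairwise row- and column-distance sums with a sort plus prefix-sum sweep per axis.
import Mathlib
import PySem

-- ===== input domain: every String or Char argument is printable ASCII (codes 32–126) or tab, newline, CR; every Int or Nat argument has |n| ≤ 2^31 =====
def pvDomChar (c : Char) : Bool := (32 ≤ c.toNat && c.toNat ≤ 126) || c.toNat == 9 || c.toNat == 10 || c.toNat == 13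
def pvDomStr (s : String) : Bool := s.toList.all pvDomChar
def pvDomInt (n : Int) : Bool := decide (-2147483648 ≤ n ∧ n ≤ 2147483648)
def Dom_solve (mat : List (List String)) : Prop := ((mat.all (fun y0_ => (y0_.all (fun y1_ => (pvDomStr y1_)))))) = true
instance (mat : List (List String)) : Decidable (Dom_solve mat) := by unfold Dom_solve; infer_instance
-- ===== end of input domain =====

-- B replaces A's two counter-sweep passes by one grouping pass (coordinates per value)
-- plus a sort + prefix-sum sweep per axis for each group: an alternative algorithm of similar cost.


-- ===== PORT A =====
-- literal transliteration of A: two passes (row-major, then column-major), each keeping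
-- running Counters cnt (occurrences) and pref (coordinate prefix sums) per value;
-- state is (ans, pref, cnt)
def solve (mat : List (List String)) : Int :=
  let m : Int := (mat.length : Int)
  let n : Int := ((PySem.List.pyGetD mat 0 []).length : Int)
  let s1 : Int × PySem.Dict String Int × PySem.Dict String Int :=
    (PySem.List.pyRange 0 m).foldl (fun s i =>
      let s' := (PySem.List.pyRange 0 n).foldl
          (fun (t : Int × PySem.Dict String Int × PySem.Dict String Int) j =>
            let v := PySem.List.pyGetD (PySem.List.pyGetD mat i []) j ""
            (t.1 + i * t.2.2.getD v 0 - t.2.1.getD v 0, t.2.1, t.2.2)) s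
      (PySem.List.pyRange 0 n).foldl
          (fun t j =>
            let v := PySem.List.pyGetD (PySem.List.pyGetD mat i []) j ""
            (t.1, t.2.1.modify v 0 (· + i), t.2.2.modify v 0 (· + 1))) s')
      (0, PySem.Dict.empty, PySem.Dict.empty)
  let s2 : Int × PySem.Dict String Int × PySem.Dict String Int :=
    (PySem.List.pyRange 0 n).foldl (fun s j =>
      let s' := (PySem.List.pyRange 0 m).foldl
          (fun (t : Int × PySem.Dict String Int × PySem.Dict String Int) i =>
            let v := PySem.List.pyGetD (PySem.List.pyGetD mat i []) j ""
            (t.1 + j * t.2.2.getD v 0 - t.2.1.getD v 0, t.2.1, t.2.2)) s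
      (PySem.List.pyRange 0 m).foldl
          (fun t i =>
            let v := PySem.List.pyGetD (PySem.List.pyGetD mat i []) j ""
            (t.1, t.2.1.modify v 0 (· + j), t.2.2.modify v 0 (· + 1))) s')
      (s1.1, PySem.Dict.empty, PySem.Dict.empty)
  s2.1

-- ===== PORT B =====
-- _sweep of Source B: state (total, run), loop over enumerate(xs)
def sweepAlt (xs : List Int) : Int :=
  ((PySem.List.enumerate xs).foldl (fun (s : Int × Int) p => (s.1 + p.2 * p.1 - s.2, s.2 + p.2)) (0, 0)).1

-- 'groups.setdefault(v, []).append(p)' builds the same dict as d[v] = d.get(v, []) + [p]: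
-- ported as Dict.modify (exact: same keys in the same first-occurrence order, same lists)
def solve_alt (mat : List (List String)) : Int :=
  let n : Int := ((PySem.List.pyGetD mat 0 []).length : Int)
  let groups : PySem.Dict String (List (Int × Int)) :=
    (PySem.List.enumerate mat).foldl (fun d p =>
      (PySem.List.pyRange 0 n).foldl (fun d j =>
        d.modify (PySem.List.pyGetD p.2 j "") [] (· ++ [(p.1, j)])) d)
      PySem.Dict.empty
  groups.values.foldl (fun ans pts =>
    ans + sweepAlt (PySem.List.sorted (pts.map (·.1)) (fun x => x))
        + sweepAlt (PySem.List.sorted (pts.map (·.2)) (fun x => x))) 0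

-- ===== PRECONDITION & SPEC =====
-- Pre_solve = exactly the inputs where Python A returns: mat nonempty (else len(mat[0]) raises
-- IndexError) and every row at least as long as the first (else mat[i][j] raises IndexError)
def Pre_solve (mat : List (List String)) : Prop :=
  mat ≠ [] ∧ ∀ row ∈ mat, (PySem.List.pyGetD mat 0 []).length ≤ row.length
instance (mat : List (List String)) : Decidable (Pre_solve mat) := by unfold Pre_solve; infer_instance
def pvWitness_solve : List (List String) := [["a", "b"], ["b", "a"]]

def Spec_solve (mat : List (List String)) (out : Int) : Prop := out = solve_alt mat
instance (mat : List (List String)) (out : Int) : Decidable (Spec_solve mat out) := by unfold Spec_solve; infer_instance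

-- ===== CLAIM (what is proved, stated in full; the proofs are below) =====
def Claim_equal_solve : Prop := ∀ (mat : List (List String)), Dom_solve mat → Pre_solve mat → Spec_solve mat (solve mat)

-- ===== LEMMAS AND PROOFS =====

-- value of cell (i, j), with the same out-of-range defaults the ports' pyGetD uses
def pvVal (mat : List (List String)) (i j : Nat) : String := (mat.getD i []).getD j ""
def pvN (mat : List (List String)) : Nat := (PySem.List.pyGetD mat 0 []).length

-- the cells (value, (i, j)) in row-major and in column-major order
def pvCellsB (mat : List (List String)) : List (String × Int × Int) :=
  (List.range mat.length).flatMap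
    (fun i => (List.range (pvN mat)).map (fun j => (pvVal mat i j, ((i : Int), (j : Int)))))
def pvCellsT (mat : List (List String)) : List (String × Int × Int) :=
  (List.range (pvN mat)).flatMap
    (fun j => (List.range mat.length).map (fun i => (pvVal mat i j, ((i : Int), (j : Int)))))

-- per-axis (value, coordinate) streams
def pvPX (mat : List (List String)) : List (String × Int) := (pvCellsB mat).map (fun c => (c.1, c.2.1))
def pvPY (mat : List (List String)) : List (String × Int) := (pvCellsT mat).map (fun c => (c.1, c.2.2))

-- sum over pairs p<q of xs[q]-xs[p]
def pvG : List Int → Int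
  | [] => 0
  | x :: t => ((t.map (fun y => y - x)).sum) + pvG t

-- sum over pairs p<q with equal keys of coord[q]-coord[p]
def pvF : List (String × Int) → Int
  | [] => 0
  | e :: t => (((t.filter (fun x => x.1 == e.1)).map (fun x => x.2 - e.2)).sum) + pvF t

def pvCnt (P : List (String × Int)) (v : String) : Int := ((P.map Prod.fst).count v : Int)
def pvSum (P : List (String × Int)) (v : String) : Int :=
  ((P.filter (fun e => e.1 == v)).map (fun e => e.2)).sum

-- A's per-pass step, abstracted over a block (coordinate, row of values)
def pvStepA (s : Int × PySem.Dict String Int × PySem.Dict String Int) (b : Int × List String) :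
    Int × PySem.Dict String Int × PySem.Dict String Int :=
  let s' := b.2.foldl (fun (t : Int × PySem.Dict String Int × PySem.Dict String Int) v =>
      (t.1 + b.1 * t.2.2.getD v 0 - t.2.1.getD v 0, t.2.1, t.2.2)) s
  b.2.foldl (fun t v => (t.1, t.2.1.modify v 0 (· + b.1), t.2.2.modify v 0 (· + 1))) s'

def pvFlat (bs : List (Int × List String)) : List (String × Int) :=
  bs.flatMap (fun b => b.2.map (fun v => (v, b.1)))

def pvBlocksX (mat : List (List String)) : List (Int × List String) :=
  (List.range mat.length).map (fun (i : Nat) => ((i : Int), (List.range (pvN mat)).map (fun j => pvVal mat i j)))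
def pvBlocksY (mat : List (List String)) : List (Int × List String) :=
  (List.range (pvN mat)).map (fun (j : Nat) => ((j : Int), (List.range mat.length).map (fun i => pvVal mat i j)))

-- ---- counting helpers ----
theorem pvCnt_append (P Q : List (String × Int)) (v : String) :
    pvCnt (P ++ Q) v = pvCnt P v + pvCnt Q v := by
  simp [pvCnt, List.count_append]

theorem pvSum_append (P Q : List (String × Int)) (v : String) :
    pvSum (P ++ Q) v = pvSum P v + pvSum Q v := by
  simp [pvSum, List.filter_append]

theorem pvCnt_block (vs : List String) (c : Int) (v : String) :
    pvCnt (vs.map (fun w => (w, c))) v = (vs.count v : Int) := by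
  induction vs with
  | nil => simp [pvCnt]
  | cons w vs ih =>
    by_cases h : w = v <;> simp_all [pvCnt]

theorem pvSum_block (vs : List String) (c : Int) (v : String) :
    pvSum (vs.map (fun w => (w, c))) v = c * (vs.count v : Int) := by
  induction vs with
  | nil => simp [pvSum]
  | cons w vs ih =>
    by_cases h : w = v
    · simp_all [pvSum]
      ring
    · simp_all [pvSum]

-- ---- pvF structure ----
theorem pvF_snoc (P : List (String × Int)) (v : String) (c : Int) :
    pvF (P ++ [(v, c)]) = pvF P + c * pvCnt P v - pvSum P v := by
  induction P with
  | nil => simp [pvF, pvCnt, pvSum]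
  | cons e t ih =>
    by_cases h : v = e.1
    · subst h
      simp [pvF, List.filter_append, ih, pvCnt, pvSum]
      ring
    · have h' : ¬ (e.1 = v) := fun hh => h hh.symm
      simp [pvF, List.filter_append, h, h', ih, pvCnt, pvSum]
      ring

theorem pvF_block (P : List (String × Int)) (vs : List String) (c : Int) :
    pvF (P ++ vs.map (fun w => (w, c))) =
      pvF P + (vs.map (fun w => c * pvCnt P w - pvSum P w)).sum := by
  induction vs using List.reverseRecOn with
  | nil => simp
  | append_singleton vs w ih =>
    simp only [List.map_append, List.map_cons, List.map_nil]
    rw [← List.append_assoc, pvF_snoc, ih, pvCnt_append, pvSum_append, pvCnt_block, pvSum_block]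
    simp [List.sum_append]
    ring

-- ---- A-side loop evaluation ----
theorem pvLoop1 (vs : List String) (c a : Int) (d1 d2 : PySem.Dict String Int) :
    vs.foldl (fun (t : Int × PySem.Dict String Int × PySem.Dict String Int) v =>
        (t.1 + c * t.2.2.getD v 0 - t.2.1.getD v 0, t.2.1, t.2.2)) (a, d1, d2)
      = (a + (vs.map (fun v => c * d2.getD v 0 - d1.getD v 0)).sum, d1, d2) := by
  induction vs generalizing a with
  | nil => simp
  | cons w vs ih =>
    simp only [List.foldl_cons, ih, List.map_cons, List.sum_cons]
    ring_nf

theorem pvLoop2 (vs : List String) (c a : Int) (d1 d2 : PySem.Dict String Int) :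
    vs.foldl (fun (t : Int × PySem.Dict String Int × PySem.Dict String Int) v =>
        (t.1, t.2.1.modify v 0 (· + c), t.2.2.modify v 0 (· + 1))) (a, d1, d2)
      = (a, vs.foldl (fun d v => d.modify v 0 (· + c)) d1,
            vs.foldl (fun d v => d.modify v 0 (· + 1)) d2) := by
  induction vs generalizing a d1 d2 with
  | nil => simp
  | cons w vs ih => simp only [List.foldl_cons, ih]

theorem pvGetD_pref_loop (vs : List String) (c : Int) (d : PySem.Dict String Int) (v : String) :
    (vs.foldl (fun d w => d.modify w 0 (· + c)) d).getD v 0 = d.getD v 0 + c * (vs.count v : Int) := by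
  induction vs generalizing d with
  | nil => simp
  | cons w vs ih =>
    rw [List.foldl_cons, ih, PySem.Dict.getD_modify, List.count_cons]
    by_cases h : v = w
    · simp [h]
      ring
    · have h' : ¬ (w = v) := fun hh => h hh.symm
      simp [h, h']

theorem pvFoldA (bs : List (Int × List String)) (Q : List (String × Int)) (a : Int)
    (d1 d2 : PySem.Dict String Int)
    (h1 : ∀ v, d1.getD v 0 = pvSum Q v) (h2 : ∀ v, d2.getD v 0 = pvCnt Q v) :
    (bs.foldl pvStepA (a, d1, d2)).1 = a + pvF (Q ++ pvFlat bs) - pvF Q := by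
  induction bs generalizing Q a d1 d2 with
  | nil => simp [pvFlat]
  | cons b bs ih =>
    rw [List.foldl_cons]
    have hmap : b.2.map (fun v => b.1 * d2.getD v 0 - d1.getD v 0)
        = b.2.map (fun w => b.1 * pvCnt Q w - pvSum Q w) :=
      List.map_congr_left (fun v _ => by rw [h1, h2])
    have hstep : pvStepA (a, d1, d2) b
        = (a + (b.2.map (fun w => b.1 * pvCnt Q w - pvSum Q w)).sum,
           b.2.foldl (fun d v => d.modify v 0 (· + b.1)) d1,
           b.2.foldl (fun d v => d.modify v 0 (· + 1)) d2) := by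
      unfold pvStepA
      rw [pvLoop1, pvLoop2, hmap]
    rw [hstep,
      ih (Q ++ b.2.map (fun w => (w, b.1))) _ _ _
        (fun v => by
          rw [pvGetD_pref_loop, h1, pvSum_append, pvSum_block])
        (fun v => by
          rw [PySem.Dict.getD_foldl_modify_add_one, h2, pvCnt_append, pvCnt_block])]
    have hflat : pvFlat (b :: bs) = b.2.map (fun w => (w, b.1)) ++ pvFlat bs := by
      simp [pvFlat]
    rw [hflat, ← List.append_assoc, pvF_block (P := Q)]
    ring

-- ---- port A characterization ----
theorem pvFlat_blocksX (mat : List (List String)) : pvFlat (pvBlocksX mat) = pvPX mat := by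
  simp [pvFlat, pvBlocksX, pvPX, pvCellsB, List.flatMap_map, List.map_flatMap, List.map_map]
  rfl

theorem pvFlat_blocksY (mat : List (List String)) : pvFlat (pvBlocksY mat) = pvPY mat := by
  simp [pvFlat, pvBlocksY, pvPY, pvCellsT, List.flatMap_map, List.map_flatMap, List.map_map]
  rfl

theorem solveA_eq (mat : List (List String)) : solve mat = pvF (pvPX mat) + pvF (pvPY mat) := by
  simp only [solve, PySem.List.pyRange_zero_natCast, List.foldl_map, PySem.List.pyGetD_natCast]
  have hx : ∀ a : Int,
      List.foldl
        (fun (x : Int × PySem.Dict String Int × PySem.Dict String Int) (y : Nat) =>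
          List.foldl
            (fun x y_1 => (x.1, x.2.1.modify ((mat.getD y []).getD y_1 "") 0 fun x => x + ↑y,
                x.2.2.modify ((mat.getD y []).getD y_1 "") 0 fun x => x + 1))
            (List.foldl
              (fun x y_1 => (x.1 + ↑y * x.2.2.getD ((mat.getD y []).getD y_1 "") 0 -
                  x.2.1.getD ((mat.getD y []).getD y_1 "") 0, x.2.1, x.2.2))
              x (List.range (PySem.List.pyGetD mat 0 []).length))
            (List.range (PySem.List.pyGetD mat 0 []).length))
        (a, PySem.Dict.empty, PySem.Dict.empty) (List.range mat.length)
      = (pvBlocksX mat).foldl pvStepA (a, PySem.Dict.empty, PySem.Dict.empty) := by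
    intro a
    rw [pvBlocksX, List.foldl_map]
    congr 1
    funext s i
    unfold pvStepA pvVal pvN
    simp only [List.foldl_map]
  have hy : ∀ a : Int,
      List.foldl
        (fun (x : Int × PySem.Dict String Int × PySem.Dict String Int) (y : Nat) =>
          List.foldl
            (fun x y_1 => (x.1, x.2.1.modify ((mat.getD y_1 []).getD y "") 0 fun x => x + ↑y,
                x.2.2.modify ((mat.getD y_1 []).getD y "") 0 fun x => x + 1))
            (List.foldl
              (fun x y_1 => (x.1 + ↑y * x.2.2.getD ((mat.getD y_1 []).getD y "") 0 -
                  x.2.1.getD ((mat.getD y_1 []).getD y "") 0, x.2.1, x.2.2))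
              x (List.range mat.length))
            (List.range mat.length))
        (a, PySem.Dict.empty, PySem.Dict.empty) (List.range (PySem.List.pyGetD mat 0 []).length)
      = (pvBlocksY mat).foldl pvStepA (a, PySem.Dict.empty, PySem.Dict.empty) := by
    intro a
    rw [pvBlocksY, List.foldl_map]
    congr 1
    funext s j
    unfold pvStepA pvVal
    simp only [List.foldl_map]
  rw [hx 0, hy]
  rw [pvFoldA _ [] _ _ _ (fun v => by simp [pvSum]) (fun v => by simp [pvCnt]),
    pvFoldA _ [] _ _ _ (fun v => by simp [pvSum]) (fun v => by simp [pvCnt])]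
  rw [pvFlat_blocksX, pvFlat_blocksY]
  simp [pvF]

-- ---- B-side ----
theorem pvSum_map_sub (xs : List Int) (x : Int) :
    (xs.map (fun y => y - x)).sum = xs.sum - (xs.length : Int) * x := by
  induction xs with
  | nil => simp
  | cons z zs ih =>
    simp [ih]
    ring

theorem pvSweep_inv (xs : List Int) (k t r : Int) :
    (PySem.List.enumerate xs k).foldl (fun (s : Int × Int) p => (s.1 + p.2 * p.1 - s.2, s.2 + p.2)) (t, r)
      = (t + pvG xs + k * xs.sum - r * (xs.length : Int), r + xs.sum) := by
  induction xs generalizing k t r with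
  | nil => simp [PySem.List.enumerate, pvG]
  | cons x xs ih =>
    rw [PySem.List.enumerate_cons, List.foldl_cons, ih]
    refine Prod.ext ?_ (by simp [List.sum_cons]; ring)
    simp only [pvG, pvSum_map_sub, List.sum_cons, List.length_cons]
    push_cast
    ring

theorem pvSweep_eq (xs : List Int) : sweepAlt xs = pvG xs := by
  have h := pvSweep_inv xs 0 0 0
  simp only [sweepAlt, h]
  ring

theorem pvF_singleKey (v : String) (P : List (String × Int)) (h : ∀ e ∈ P, e.1 = v) :
    pvF P = pvG (P.map (fun e => e.2)) := by
  induction P with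
  | nil => simp [pvF, pvG]
  | cons e t ih =>
    have hft : t.filter (fun x => x.1 == e.1) = t := by
      apply List.filter_eq_self.mpr
      intro x hx
      simp [h x (List.mem_cons_of_mem _ hx), h e List.mem_cons_self]
    rw [List.map_cons]
    simp only [pvF, pvG, hft]
    rw [ih (fun x hx => h x (List.mem_cons_of_mem _ hx)), List.map_map]
    rfl

theorem pvSum_update (D : List String) (g h : String → Int) (a : String) (δ : Int)
    (hD : D.Nodup) (ha : a ∈ D) (hne : ∀ v ∈ D, v ≠ a → g v = h v) (hA : g a = h a + δ) :
    (D.map g).sum = (D.map h).sum + δ := by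
  induction D with
  | nil => simp at ha
  | cons d D ih =>
    rcases List.nodup_cons.mp hD with ⟨hdD, hD'⟩
    by_cases h : d = a
    · subst h
      have : ∀ v ∈ D, g v = h v := fun v hv =>
        hne v (List.mem_cons_of_mem _ hv) (fun hva => hdD (hva ▸ hv))
      rw [List.map_cons, List.map_cons, List.sum_cons, List.sum_cons, hA,
        List.map_congr_left this]
      ring
    · have haD : a ∈ D := by
        rcases List.mem_cons.mp ha with h1 | h1
        · exact absurd h1.symm h
        · exact h1
      rw [List.map_cons, List.map_cons, List.sum_cons, List.sum_cons,
        hne d List.mem_cons_self h,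
        ih hD' haD (fun v hv hva => hne v (List.mem_cons_of_mem _ hv) hva)]
      ring

theorem pvF_split (D : List String) (P : List (String × Int)) (hD : D.Nodup)
    (hcov : ∀ e ∈ P, e.1 ∈ D) :
    pvF P = (D.map (fun v => pvF (P.filter (fun e => e.1 == v)))).sum := by
  induction P with
  | nil =>
    simp [pvF]
  | cons e t ih =>
    have hcovt : ∀ x ∈ t, x.1 ∈ D := fun x hx => hcov x (List.mem_cons_of_mem _ hx)
    have hstep : (D.map (fun v => pvF ((e :: t).filter (fun x => x.1 == v)))).sum
        = (D.map (fun v => pvF (t.filter (fun x => x.1 == v)))).sum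
          + ((t.filter (fun x => x.1 == e.1)).map (fun x => x.2 - e.2)).sum := by
      apply pvSum_update D _ _ e.1 _ hD (hcov e List.mem_cons_self)
      · intro v hv hvne
        have : ¬ (e.1 = v) := fun hh => hvne hh.symm
        simp [this]
      · have hff : (t.filter (fun x => x.1 == e.1)).filter (fun x => x.1 == e.1)
            = t.filter (fun x => x.1 == e.1) := by
          apply List.filter_eq_self.mpr
          intro x hx
          exact (List.mem_filter.mp hx).2
        simp only [List.filter_cons, beq_self_eq_true, if_true]
        simp [pvF, hff]
        ring
    rw [hstep, ← ih hcovt]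
    simp [pvF]
    ring

-- ---- permutation / order facts ----
theorem pvSwap_perm {α β γ : Type} (as : List α) (bs : List β) (f : α → β → γ) :
    (as.flatMap (fun a => bs.map (f a))).Perm (bs.flatMap (fun b => as.map (fun a => f a b))) := by
  induction as with
  | nil => simp
  | cons a as ih =>
    simp only [List.flatMap_cons, List.map_cons]
    have h2 : ∀ (g : β → γ) (h : β → List γ) (l : List β),
        (l.flatMap (fun b => g b :: h b)).Perm (l.map g ++ l.flatMap h) := by
      intro g h l
      induction l with
      | nil => simp
      | cons b l ihl =>
        simp only [List.flatMap_cons, List.map_cons, List.cons_append]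
        refine List.Perm.cons _ ?_
        refine (List.Perm.append_left (h b) ihl).trans ?_
        rw [← List.append_assoc, ← List.append_assoc]
        exact List.Perm.append_right _ List.perm_append_comm
    exact (List.Perm.append_left _ ih).trans
      ((h2 (f a) (fun b => (as.map (fun a => f a b))) bs).symm)

theorem pvCells_perm (mat : List (List String)) : (pvCellsB mat).Perm (pvCellsT mat) := by
  unfold pvCellsB pvCellsT
  exact pvSwap_perm _ _ (fun i j => (pvVal mat i j, ((i : Int), (j : Int))))

theorem pvPairwise_flat {γ : Type} (m n : Nat) (f : Nat → Nat → γ) (proj : γ → Int)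
    (hproj : ∀ i j, proj (f i j) = (i : Int)) :
    ((List.range m).flatMap (fun i => (List.range n).map (f i))).Pairwise
      (fun a b => proj a ≤ proj b) := by
  induction m with
  | zero => simp
  | succ m ih =>
    rw [List.range_succ, List.flatMap_append, List.flatMap_singleton]
    rw [List.pairwise_append]
    refine ⟨ih, ?_, ?_⟩
    · exact List.pairwise_map.mpr ((List.pairwise_lt_range).imp (fun _ => by
        simp [hproj]))
    · intro x hx y hy
      rcases List.mem_flatMap.mp hx with ⟨i, hi, hxi⟩
      rcases List.mem_map.mp hxi with ⟨j, _, rfl⟩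
      rcases List.mem_map.mp hy with ⟨j', _, rfl⟩
      rw [hproj, hproj]
      exact_mod_cast Nat.le_of_lt (List.mem_range.mp hi)

theorem pvPairwise_cellsB (mat : List (List String)) :
    (pvCellsB mat).Pairwise (fun a b => a.2.1 ≤ b.2.1) := by
  unfold pvCellsB
  exact pvPairwise_flat _ _ _ _ (fun i j => rfl)

theorem pvPairwise_cellsT (mat : List (List String)) :
    (pvCellsT mat).Pairwise (fun a b => a.2.2 ≤ b.2.2) := by
  unfold pvCellsT
  exact pvPairwise_flat _ _ (fun j i => (pvVal mat i j, ((i : Int), (j : Int)))) (fun c => c.2.2)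
    (fun i j => rfl)

-- ---- port B characterization ----
theorem pvRows_eq (mat : List (List String)) (v : String) :
    sweepAlt (PySem.List.sorted
        ((((pvCellsB mat).filter (fun c => c.1 == v)).map (fun c => c.2)).map (fun p => p.1))
        (fun x => x))
      = pvF ((pvPX mat).filter (fun e => e.1 == v)) := by
  have hmm : (((pvCellsB mat).filter (fun c => c.1 == v)).map (fun c => c.2)).map (fun p => p.1)
      = ((pvCellsB mat).filter (fun c => c.1 == v)).map (fun c => c.2.1) := by
    rw [List.map_map]
    rfl
  have hpw : (((pvCellsB mat).filter (fun c => c.1 == v)).map (fun c => c.2.1)).Pairwise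
      (fun a b => a ≤ b) :=
    List.pairwise_map.mpr ((pvPairwise_cellsB mat).filter _)
  rw [hmm, PySem.List.sorted_id_eq_of_perm_of_pairwise _ _ (List.Perm.refl _) hpw, pvSweep_eq,
    pvF_singleKey v _ (fun e he => beq_iff_eq.mp (List.mem_filter.mp he).2)]
  congr 1
  rw [pvPX, List.filter_map, List.map_map]
  rfl

theorem pvCols_eq (mat : List (List String)) (v : String) :
    sweepAlt (PySem.List.sorted
        ((((pvCellsB mat).filter (fun c => c.1 == v)).map (fun c => c.2)).map (fun p => p.2))
        (fun x => x))
      = pvF ((pvPY mat).filter (fun e => e.1 == v)) := by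
  have hmm : (((pvCellsB mat).filter (fun c => c.1 == v)).map (fun c => c.2)).map (fun p => p.2)
      = ((pvCellsB mat).filter (fun c => c.1 == v)).map (fun c => c.2.2) := by
    rw [List.map_map]
    rfl
  have hperm : (((pvCellsT mat).filter (fun c => c.1 == v)).map (fun c => c.2.2)).Perm
      (((pvCellsB mat).filter (fun c => c.1 == v)).map (fun c => c.2.2)) :=
    ((pvCells_perm mat).symm.filter _).map _
  have hpw : (((pvCellsT mat).filter (fun c => c.1 == v)).map (fun c => c.2.2)).Pairwise
      (fun a b => a ≤ b) :=
    List.pairwise_map.mpr ((pvPairwise_cellsT mat).filter _)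
  rw [hmm, PySem.List.sorted_id_eq_of_perm_of_pairwise _ _ hperm hpw, pvSweep_eq,
    pvF_singleKey v _ (fun e he => beq_iff_eq.mp (List.mem_filter.mp he).2)]
  congr 1
  rw [pvPY, List.filter_map, List.map_map]
  rfl

set_option maxHeartbeats 1000000 in
theorem solveB_eq (mat : List (List String)) :
    solve_alt mat =
      ((PySem.Set.ofList ((pvCellsB mat).map (fun c => c.1))).map (fun v =>
        pvF ((pvPX mat).filter (fun e => e.1 == v)) + pvF ((pvPY mat).filter (fun e => e.1 == v)))).sum := by
  simp only [solve_alt, PySem.List.enumerate_eq_map_pyRange mat ([] : List String),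
    PySem.List.len, PySem.List.pyRange_zero_natCast, List.foldl_map, PySem.List.pyGetD_natCast]
  have hg : (List.foldl
        (fun (x : PySem.Dict String (List (Int × Int))) (y : Nat) =>
          List.foldl (fun x y_1 => x.modify ((mat.getD y []).getD y_1 "") []
              fun x => x ++ [((y : Int), (y_1 : Int))]) x
            (List.range (PySem.List.pyGetD mat 0 []).length))
        PySem.Dict.empty (List.range mat.length))
      = (pvCellsB mat).foldl (fun d c => d.modify c.1 [] (fun l => l ++ [c.2])) PySem.Dict.empty := by
    rw [pvCellsB, List.foldl_flatMap]
    congr 1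
    funext d i
    rw [List.foldl_map]
    rfl
  rw [hg]
  have hnd : ((pvCellsB mat).foldl (fun d c => d.modify c.1 [] (fun l => l ++ [c.2]))
      PySem.Dict.empty).keys.Nodup :=
    PySem.Dict.nodup_keys_foldl_modify_key (pvCellsB mat)
      (fun (c : String × Int × Int) => c.1) []
      (fun _ (c : String × Int × Int) => (fun l => l ++ [c.2])) _
      PySem.Dict.nodup_keys_empty
  rw [PySem.Dict.values_eq_map_keys _ hnd [], PySem.Dict.keys_foldl_modify_key,
    PySem.Dict.keys_empty,
    show PySem.Set.update ([] : PySem.Set String) ((pvCellsB mat).map (fun c => c.1))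
        = PySem.Set.ofList ((pvCellsB mat).map (fun c => c.1)) from rfl]
  have hget : ∀ v, ((pvCellsB mat).foldl (fun d c => d.modify c.1 [] (fun l => l ++ [c.2]))
        PySem.Dict.empty).getD v []
      = ((pvCellsB mat).filter (fun c => c.1 == v)).map (fun c => c.2) := by
    intro v
    rw [PySem.Dict.getD_foldl_modify_append, PySem.Dict.getD_empty, List.nil_append]
  rw [List.foldl_map]
  have hbody : ∀ (acc : Int) (v : String),
      v ∈ PySem.Set.ofList ((pvCellsB mat).map (fun c => c.1)) →
      (acc + sweepAlt (PySem.List.sorted (List.map (fun x => x.1)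
            (((pvCellsB mat).foldl (fun d c => d.modify c.1 [] fun l => l ++ [c.2])
              PySem.Dict.empty).getD v [])) (fun x => x))
        + sweepAlt (PySem.List.sorted (List.map (fun x => x.2)
            (((pvCellsB mat).foldl (fun d c => d.modify c.1 [] fun l => l ++ [c.2])
              PySem.Dict.empty).getD v [])) (fun x => x)))
      = acc + (pvF ((pvPX mat).filter (fun e => e.1 == v))
          + pvF ((pvPY mat).filter (fun e => e.1 == v))) := by
    intro acc v hv
    rw [hget v, pvRows_eq, pvCols_eq]
    ring
  have hfold :
      List.foldl
        (fun (x : Int) y =>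
          x + sweepAlt (PySem.List.sorted (List.map (fun x => x.1)
                (((pvCellsB mat).foldl (fun d c => d.modify c.1 [] fun l => l ++ [c.2])
                  PySem.Dict.empty).getD y [])) (fun x => x))
            + sweepAlt (PySem.List.sorted (List.map (fun x => x.2)
                (((pvCellsB mat).foldl (fun d c => d.modify c.1 [] fun l => l ++ [c.2])
                  PySem.Dict.empty).getD y [])) (fun x => x)))
        0 (PySem.Set.ofList ((pvCellsB mat).map (fun c => c.1)))
      = List.foldl
        (fun (acc : Int) v =>
          acc + (pvF ((pvPX mat).filter (fun e => e.1 == v))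
            + pvF ((pvPY mat).filter (fun e => e.1 == v))))
        0 (PySem.Set.ofList ((pvCellsB mat).map (fun c => c.1))) :=
    PySem.List.foldl_congr_mem _ _ _ 0 hbody
  rw [hfold]
  rw [PySem.List.foldl_add]
  simp

-- ===== VERDICT (by name: the statement is the Claim_ definition above) =====
theorem solve_spec : Claim_equal_solve := by
  intro mat _ _
  unfold Spec_solve
  rw [solveA_eq, solveB_eq]
  rw [PySem.List.sum_map_add_int]
  rw [← pvF_split _ _ (PySem.Set.nodup_ofList _) (by
        intro e he
        rw [PySem.Set.mem_ofList]
        simp only [pvPX, List.mem_map] at he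
        obtain ⟨c, hc, rfl⟩ := he
        exact List.mem_map_of_mem hc),
      ← pvF_split _ _ (PySem.Set.nodup_ofList _) (by
        intro e he
        rw [PySem.Set.mem_ofList]
        simp only [pvPY, List.mem_map] at he
        obtain ⟨c, hc, rfl⟩ := he
        exact List.mem_map_of_mem ((pvCells_perm mat).mem_iff.mpr hc))]
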